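-- pv_equiv track=rewrite | github.com/aryansinghshaktawat/CIOT | src/utils/enhanced_phone_osint.py | _get_indian_circle_info
-- ===== SOURCE A (Python) =====
-- from typing import Dict, List, Any, Optional
--
-- def _get_indian_circle_info(national_number: str) -> Dict[str, Any]:
--     """Get Indian telecom circle information"""
--     first_four = national_number[:4]
--
--     # Major metro circles
--     metro_circles = {
--         'Delhi': ['9810', '9811', '9812', '9813', '9814', '9815', '7011', '7012'],
--         'Mumbai': ['9820', '9821', '9822', '9823', '9824', '9825', '7021', '7022'],
--         'Kolkata': ['9830', '9831', '9832', '9833', '9834', '9835', '7031', '7032'],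
--         'Chennai': ['9840', '9841', '9842', '9843', '9844', '9845', '7041', '7042'],
--         'Bangalore': ['9880', '9881', '9882', '9883', '9884', '9885', '8080', '8081'],
--         'Hyderabad': ['9848', '9849', '9850', '9851', '9852', '9853', '7048', '7049']
--     }
--
--     for circle, patterns in metro_circles.items():
--         if first_four in patterns:
--             return {
--                 'circle': f'{circle} Metro',
--                 'type': 'Metro Circle',
--                 'confidence': 'High'
--             }
--
--     return {
--         'circle': 'Other Circle',
--         'type': 'State Circle',
--         'confidence': 'Medium'
--     }
-- ===== SOURCE B (Python) =====
-- from typing import Dict, List, Any, Optional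
--
-- def _get_indian_circle_info(national_number: str) -> Dict[str, Any]:
--     """Get Indian telecom circle information"""
--     p = national_number[:4]
--     name = None
--     if len(p) == 4:
--         a, b, c, d = p
--         if a == '9' and b == '8':
--             if c == '1' and '0' <= d <= '5':
--                 name = 'Delhi'
--             elif c == '2' and '0' <= d <= '5':
--                 name = 'Mumbai'
--             elif c == '3' and '0' <= d <= '5':
--                 name = 'Kolkata'
--             elif c == '4':
--                 if '0' <= d <= '5':
--                     name = 'Chennai'
--                 elif '8' <= d <= '9':
--                     name = 'Hyderabad'
--             elif c == '5' and '0' <= d <= '3':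
--                 name = 'Hyderabad'
--             elif c == '8' and '0' <= d <= '5':
--                 name = 'Bangalore'
--         elif a == '7' and b == '0':
--             if c == '1' and '1' <= d <= '2':
--                 name = 'Delhi'
--             elif c == '2' and '1' <= d <= '2':
--                 name = 'Mumbai'
--             elif c == '3' and '1' <= d <= '2':
--                 name = 'Kolkata'
--             elif c == '4':
--                 if '1' <= d <= '2':
--                     name = 'Chennai'
--                 elif '8' <= d <= '9':
--                     name = 'Hyderabad'
--         elif a == '8' and b == '0' and c == '8' and '0' <= d <= '1':
--             name = 'Bangalore'
--     if name is None:
--         return {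
--             'circle': 'Other Circle',
--             'type': 'State Circle',
--             'confidence': 'Medium'
--         }
--     return {
--         'circle': f'{name} Metro',
--         'type': 'Metro Circle',
--         'confidence': 'High'
--     }
-- ===== Notes on version B (the rewrite author's own statement) =====
-- stated objective: alternative
-- what changed: Replaces A's data table (six circle/prefix-list entries scanned with membership tests) by a table-free decision tree: unpack the four prefix characters and classify them with nested character equality/range comparisons.
import Mathlib
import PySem

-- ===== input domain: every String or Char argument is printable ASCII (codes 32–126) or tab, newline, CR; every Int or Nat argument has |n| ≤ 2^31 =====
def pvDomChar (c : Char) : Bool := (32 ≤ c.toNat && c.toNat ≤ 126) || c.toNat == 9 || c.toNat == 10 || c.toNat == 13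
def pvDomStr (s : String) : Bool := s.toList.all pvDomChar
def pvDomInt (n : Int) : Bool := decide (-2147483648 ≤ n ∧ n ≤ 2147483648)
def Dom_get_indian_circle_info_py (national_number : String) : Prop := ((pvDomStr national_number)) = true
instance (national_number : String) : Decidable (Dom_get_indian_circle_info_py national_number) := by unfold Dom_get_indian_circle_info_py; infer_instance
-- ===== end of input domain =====

-- B replaces A's data table (six circle / prefix-list entries scanned per call) by a
-- table-free decision tree over the four unpacked prefix characters (objective: alternative).


-- ===== PORT A =====
-- metro_circles, in Python's insertion order
def pvMetroCircles : List (String × List String) :=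
  [("Delhi", ["9810", "9811", "9812", "9813", "9814", "9815", "7011", "7012"]),
   ("Mumbai", ["9820", "9821", "9822", "9823", "9824", "9825", "7021", "7022"]),
   ("Kolkata", ["9830", "9831", "9832", "9833", "9834", "9835", "7031", "7032"]),
   ("Chennai", ["9840", "9841", "9842", "9843", "9844", "9845", "7041", "7042"]),
   ("Bangalore", ["9880", "9881", "9882", "9883", "9884", "9885", "8080", "8081"]),
   ("Hyderabad", ["9848", "9849", "9850", "9851", "9852", "9853", "7048", "7049"])]

-- the 'for circle, patterns in metro_circles.items(): if first_four in patterns: return …' loop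
def pvScanA : List (String × List String) → String → Option String
  | [], _ => none
  | (circle, patterns) :: rest, ff => if ff ∈ patterns then some circle else pvScanA rest ff

def get_indian_circle_info_py (national_number : String) : List (String × String) :=
  let first_four := PySem.Str.slice national_number none (some 4)
  match pvScanA pvMetroCircles first_four with
  | some circle => [("circle", circle ++ " Metro"), ("type", "Metro Circle"), ("confidence", "High")]
  | none => [("circle", "Other Circle"), ("type", "State Circle"), ("confidence", "Medium")]

-- ===== PORT B =====
-- Source B's nested if/elif decision tree on the four unpacked characters a, b, c, d
def pvTree (a b c d : Char) : Option String :=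
  if a = '9' ∧ b = '8' then
    if c = '1' ∧ ('0' ≤ d ∧ d ≤ '5') then some "Delhi"
    else if c = '2' ∧ ('0' ≤ d ∧ d ≤ '5') then some "Mumbai"
    else if c = '3' ∧ ('0' ≤ d ∧ d ≤ '5') then some "Kolkata"
    else if c = '4' then
      if '0' ≤ d ∧ d ≤ '5' then some "Chennai"
      else if '8' ≤ d ∧ d ≤ '9' then some "Hyderabad"
      else none
    else if c = '5' ∧ ('0' ≤ d ∧ d ≤ '3') then some "Hyderabad"
    else if c = '8' ∧ ('0' ≤ d ∧ d ≤ '5') then some "Bangalore"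
    else none
  else if a = '7' ∧ b = '0' then
    if c = '1' ∧ ('1' ≤ d ∧ d ≤ '2') then some "Delhi"
    else if c = '2' ∧ ('1' ≤ d ∧ d ≤ '2') then some "Mumbai"
    else if c = '3' ∧ ('1' ≤ d ∧ d ≤ '2') then some "Kolkata"
    else if c = '4' then
      if '1' ≤ d ∧ d ≤ '2' then some "Chennai"
      else if '8' ≤ d ∧ d ≤ '9' then some "Hyderabad"
      else none
    else none
  else if a = '8' ∧ b = '0' ∧ c = '8' ∧ ('0' ≤ d ∧ d ≤ '1') then some "Bangalore"
  else none

def get_indian_circle_info_py_alt (national_number : String) : List (String × String) :=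
  let p := PySem.Str.slice national_number none (some 4)
  -- 'if len(p) == 4: a, b, c, d = p; name = <tree>' — name stays None on any other shape
  let name : Option String :=
    match p.toList with
    | [a, b, c, d] => pvTree a b c d
    | _ => none
  match name with
  | some n => [("circle", n ++ " Metro"), ("type", "Metro Circle"), ("confidence", "High")]
  | none => [("circle", "Other Circle"), ("type", "State Circle"), ("confidence", "Medium")]

-- ===== PRECONDITION & SPEC =====
def Spec_get_indian_circle_info_py (national_number : String) (out : List (String × String)) : Prop := out = get_indian_circle_info_py_alt national_number
instance (national_number : String) (out : List (String × String)) : Decidable (Spec_get_indian_circle_info_py national_number out) := by unfold Spec_get_indian_circle_info_py; infer_instance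

-- ===== CLAIM =====
def Claim_equal_get_indian_circle_info_py : Prop := ∀ (national_number : String), Dom_get_indian_circle_info_py national_number → Spec_get_indian_circle_info_py national_number (get_indian_circle_info_py national_number)

-- ===== LEMMAS AND PROOFS =====

-- char equality / order read through code points, so omega can work on them
theorem pvCharEqNat (a b : Char) : (a = b) ↔ a.toNat = b.toNat :=
  ⟨fun h => h ▸ rfl, fun h => Char.ext (UInt32.toNat_inj.mp h)⟩
theorem pvCharLeNat (a b : Char) : (a ≤ b) ↔ a.toNat ≤ b.toNat := Iff.rfl
theorem pvCharEqLit (x l : Char) (n : Nat) (h : l.toNat = n) : (x = l) ↔ x.toNat = n := by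
  rw [pvCharEqNat, h]
theorem pvCharLeLit (x l : Char) (n : Nat) (h : l.toNat = n) : (x ≤ l) ↔ x.toNat ≤ n := by
  rw [pvCharLeNat, h]
theorem pvCharGeLit (l x : Char) (n : Nat) (h : l.toNat = n) : (l ≤ x) ↔ n ≤ x.toNat := by
  rw [pvCharLeNat, h]

-- strings seen as code-point lists
def pvCodes (s : String) : List Nat := s.toList.map Char.toNat

theorem pvCodes_inj (p t : String) : p = t ↔ pvCodes p = pvCodes t := by
  constructor
  · rintro rfl; rfl
  · intro h
    rw [String.ext_iff]
    exact List.map_injective_iff.mpr (fun u v huv => Char.ext (UInt32.toNat_inj.mp huv)) h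

theorem pvMem_codes (p : String) (ps : List String) : p ∈ ps ↔ pvCodes p ∈ ps.map pvCodes := by
  induction ps with
  | nil => simp
  | cons q qs ih => simp only [List.mem_cons, List.map_cons, ih, pvCodes_inj p q]

-- A's scan loop replayed on code-point lists
def pvScanN : List (String × List (List Nat)) → List Nat → Option String
  | [], _ => none
  | (circle, pats) :: rest, cs => if cs ∈ pats then some circle else pvScanN rest cs

theorem pvScan_to_num (gs : List (String × List String)) (p : String) :
    pvScanA gs p = pvScanN (gs.map fun g => (g.1, g.2.map pvCodes)) (pvCodes p) := by
  induction gs with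
  | nil => rfl
  | cons g rest ih =>
    obtain ⟨c, ps⟩ := g
    by_cases h : p ∈ ps
    · rw [pvScanA, if_pos h, List.map_cons, pvScanN, if_pos ((pvMem_codes p ps).mp h)]
    · rw [pvScanA, if_neg h, List.map_cons, pvScanN,
        if_neg (fun hm => h ((pvMem_codes p ps).mpr hm)), ih]

-- the metro table, as code-point lists
def pvTableN : List (String × List (List Nat)) :=
  [("Delhi", [[57, 56, 49, 48], [57, 56, 49, 49], [57, 56, 49, 50], [57, 56, 49, 51], [57, 56, 49, 52], [57, 56, 49, 53], [55, 48, 49, 49], [55, 48, 49, 50]]),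
   ("Mumbai", [[57, 56, 50, 48], [57, 56, 50, 49], [57, 56, 50, 50], [57, 56, 50, 51], [57, 56, 50, 52], [57, 56, 50, 53], [55, 48, 50, 49], [55, 48, 50, 50]]),
   ("Kolkata", [[57, 56, 51, 48], [57, 56, 51, 49], [57, 56, 51, 50], [57, 56, 51, 51], [57, 56, 51, 52], [57, 56, 51, 53], [55, 48, 51, 49], [55, 48, 51, 50]]),
   ("Chennai", [[57, 56, 52, 48], [57, 56, 52, 49], [57, 56, 52, 50], [57, 56, 52, 51], [57, 56, 52, 52], [57, 56, 52, 53], [55, 48, 52, 49], [55, 48, 52, 50]]),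
   ("Bangalore", [[57, 56, 56, 48], [57, 56, 56, 49], [57, 56, 56, 50], [57, 56, 56, 51], [57, 56, 56, 52], [57, 56, 56, 53], [56, 48, 56, 48], [56, 48, 56, 49]]),
   ("Hyderabad", [[57, 56, 52, 56], [57, 56, 52, 57], [57, 56, 53, 48], [57, 56, 53, 49], [57, 56, 53, 50], [57, 56, 53, 51], [55, 48, 52, 56], [55, 48, 52, 57]])]

theorem pvTableN_eq : (pvMetroCircles.map fun g => (g.1, g.2.map pvCodes)) = pvTableN := by decide

-- B's decision tree replayed on code points
def pvTreeN (x y z w : Nat) : Option String :=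
  if x = 57 ∧ y = 56 then
    if z = 49 ∧ (48 ≤ w ∧ w ≤ 53) then some "Delhi"
    else if z = 50 ∧ (48 ≤ w ∧ w ≤ 53) then some "Mumbai"
    else if z = 51 ∧ (48 ≤ w ∧ w ≤ 53) then some "Kolkata"
    else if z = 52 then
      if 48 ≤ w ∧ w ≤ 53 then some "Chennai"
      else if 56 ≤ w ∧ w ≤ 57 then some "Hyderabad"
      else none
    else if z = 53 ∧ (48 ≤ w ∧ w ≤ 51) then some "Hyderabad"
    else if z = 56 ∧ (48 ≤ w ∧ w ≤ 53) then some "Bangalore"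
    else none
  else if x = 55 ∧ y = 48 then
    if z = 49 ∧ (49 ≤ w ∧ w ≤ 50) then some "Delhi"
    else if z = 50 ∧ (49 ≤ w ∧ w ≤ 50) then some "Mumbai"
    else if z = 51 ∧ (49 ≤ w ∧ w ≤ 50) then some "Kolkata"
    else if z = 52 then
      if 49 ≤ w ∧ w ≤ 50 then some "Chennai"
      else if 56 ≤ w ∧ w ≤ 57 then some "Hyderabad"
      else none
    else none
  else if x = 56 ∧ y = 48 ∧ z = 56 ∧ (48 ≤ w ∧ w ≤ 49) then some "Bangalore"
  else none

theorem pvTree_num (a b c d : Char) : pvTree a b c d = pvTreeN a.toNat b.toNat c.toNat d.toNat := by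
  simp only [pvTree, pvTreeN,
    pvCharEqLit _ '0' 48 rfl,
    pvCharGeLit '0' _ 48 rfl,
    pvCharEqLit _ '1' 49 rfl,
    pvCharLeLit _ '1' 49 rfl,
    pvCharGeLit '1' _ 49 rfl,
    pvCharEqLit _ '2' 50 rfl,
    pvCharLeLit _ '2' 50 rfl,
    pvCharEqLit _ '3' 51 rfl,
    pvCharLeLit _ '3' 51 rfl,
    pvCharEqLit _ '4' 52 rfl,
    pvCharEqLit _ '5' 53 rfl,
    pvCharLeLit _ '5' 53 rfl,
    pvCharEqLit _ '7' 55 rfl,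
    pvCharEqLit _ '8' 56 rfl,
    pvCharGeLit '8' _ 56 rfl,
    pvCharEqLit _ '9' 57 rfl,
    pvCharLeLit _ '9' 57 rfl]

-- the scan over the code table equals the numeric decision tree
set_option maxHeartbeats 1000000 in
theorem pvNum (x y z w : Nat) : pvScanN pvTableN [x, y, z, w] = pvTreeN x y z w := by
  simp only [pvScanN, pvTreeN, pvTableN, List.mem_cons, List.not_mem_nil, or_false,
    List.cons.injEq, and_true]
  by_cases h9 : x = 57 ∧ y = 56
  · obtain ⟨h1, h2⟩ := h9
    subst h1; subst h2
    simp only [Nat.reduceEqDiff, true_and, and_true, false_and,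
      and_false, or_false, if_true, if_false]
    have g1 : (z = 49 ∧ w = 48 ∨ z = 49 ∧ w = 49 ∨ z = 49 ∧ w = 50 ∨ z = 49 ∧ w = 51 ∨ z = 49 ∧ w = 52 ∨ z = 49 ∧ w = 53) ↔ (z = 49 ∧ 48 ≤ w ∧ w ≤ 53) := by omega
    have g2 : (z = 50 ∧ w = 48 ∨ z = 50 ∧ w = 49 ∨ z = 50 ∧ w = 50 ∨ z = 50 ∧ w = 51 ∨ z = 50 ∧ w = 52 ∨ z = 50 ∧ w = 53) ↔ (z = 50 ∧ 48 ≤ w ∧ w ≤ 53) := by omega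
    have g3 : (z = 51 ∧ w = 48 ∨ z = 51 ∧ w = 49 ∨ z = 51 ∧ w = 50 ∨ z = 51 ∧ w = 51 ∨ z = 51 ∧ w = 52 ∨ z = 51 ∧ w = 53) ↔ (z = 51 ∧ 48 ≤ w ∧ w ≤ 53) := by omega
    have g4 : (z = 52 ∧ w = 48 ∨ z = 52 ∧ w = 49 ∨ z = 52 ∧ w = 50 ∨ z = 52 ∧ w = 51 ∨ z = 52 ∧ w = 52 ∨ z = 52 ∧ w = 53) ↔ (z = 52 ∧ 48 ≤ w ∧ w ≤ 53) := by omega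
    have g5 : (z = 56 ∧ w = 48 ∨ z = 56 ∧ w = 49 ∨ z = 56 ∧ w = 50 ∨ z = 56 ∧ w = 51 ∨ z = 56 ∧ w = 52 ∨ z = 56 ∧ w = 53) ↔ (z = 56 ∧ 48 ≤ w ∧ w ≤ 53) := by omega
    have g6 : (z = 52 ∧ w = 56 ∨ z = 52 ∧ w = 57 ∨ z = 53 ∧ w = 48 ∨ z = 53 ∧ w = 49 ∨ z = 53 ∧ w = 50 ∨ z = 53 ∧ w = 51) ↔ (z = 52 ∧ 56 ≤ w ∧ w ≤ 57 ∨ z = 53 ∧ 48 ≤ w ∧ w ≤ 51) := by omega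
    simp only [g1, g2, g3, g4, g5, g6]
    all_goals first | rfl | (split_ifs <;> first | rfl | omega)
  by_cases h7 : x = 55 ∧ y = 48
  · obtain ⟨h1, h2⟩ := h7
    subst h1; subst h2
    simp only [Nat.reduceEqDiff, true_and, and_true, false_and,
      and_false, or_false, false_or, if_true, if_false]
    have g1 : (z = 49 ∧ w = 49 ∨ z = 49 ∧ w = 50) ↔ (z = 49 ∧ 49 ≤ w ∧ w ≤ 50) := by omega
    have g2 : (z = 50 ∧ w = 49 ∨ z = 50 ∧ w = 50) ↔ (z = 50 ∧ 49 ≤ w ∧ w ≤ 50) := by omega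
    have g3 : (z = 51 ∧ w = 49 ∨ z = 51 ∧ w = 50) ↔ (z = 51 ∧ 49 ≤ w ∧ w ≤ 50) := by omega
    have g4 : (z = 52 ∧ w = 49 ∨ z = 52 ∧ w = 50) ↔ (z = 52 ∧ 49 ≤ w ∧ w ≤ 50) := by omega
    have g6 : (z = 52 ∧ w = 56 ∨ z = 52 ∧ w = 57) ↔ (z = 52 ∧ 56 ≤ w ∧ w ≤ 57) := by omega
    simp only [g1, g2, g3, g4, g6]
    all_goals first | rfl | (split_ifs <;> first | rfl | omega)
  by_cases h8 : x = 56 ∧ y = 48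
  · obtain ⟨h1, h2⟩ := h8
    subst h1; subst h2
    simp only [Nat.reduceEqDiff, true_and, and_true, false_and,
      and_false, or_false, false_or, if_false]
    have g5 : (z = 56 ∧ w = 48 ∨ z = 56 ∧ w = 49) ↔ (z = 56 ∧ 48 ≤ w ∧ w ≤ 49) := by omega
    simp only [g5]
  have c1 : (x = 57 ∧ y = 56 ∧ z = 49 ∧ w = 48 ∨ x = 57 ∧ y = 56 ∧ z = 49 ∧ w = 49 ∨ x = 57 ∧ y = 56 ∧ z = 49 ∧ w = 50 ∨ x = 57 ∧ y = 56 ∧ z = 49 ∧ w = 51 ∨ x = 57 ∧ y = 56 ∧ z = 49 ∧ w = 52 ∨ x = 57 ∧ y = 56 ∧ z = 49 ∧ w = 53 ∨ x = 55 ∧ y = 48 ∧ z = 49 ∧ w = 49 ∨ x = 55 ∧ y = 48 ∧ z = 49 ∧ w = 50) ↔ False :=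
    iff_false_intro (by rintro (⟨hx, hy, -⟩|⟨hx, hy, -⟩|⟨hx, hy, -⟩|⟨hx, hy, -⟩|⟨hx, hy, -⟩|⟨hx, hy, -⟩|⟨hx, hy, -⟩|⟨hx, hy, -⟩) <;>
      first | exact h9 ⟨hx, hy⟩ | exact h7 ⟨hx, hy⟩)
  have c2 : (x = 57 ∧ y = 56 ∧ z = 50 ∧ w = 48 ∨ x = 57 ∧ y = 56 ∧ z = 50 ∧ w = 49 ∨ x = 57 ∧ y = 56 ∧ z = 50 ∧ w = 50 ∨ x = 57 ∧ y = 56 ∧ z = 50 ∧ w = 51 ∨ x = 57 ∧ y = 56 ∧ z = 50 ∧ w = 52 ∨ x = 57 ∧ y = 56 ∧ z = 50 ∧ w = 53 ∨ x = 55 ∧ y = 48 ∧ z = 50 ∧ w = 49 ∨ x = 55 ∧ y = 48 ∧ z = 50 ∧ w = 50) ↔ False :=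
    iff_false_intro (by rintro (⟨hx, hy, -⟩|⟨hx, hy, -⟩|⟨hx, hy, -⟩|⟨hx, hy, -⟩|⟨hx, hy, -⟩|⟨hx, hy, -⟩|⟨hx, hy, -⟩|⟨hx, hy, -⟩) <;>
      first | exact h9 ⟨hx, hy⟩ | exact h7 ⟨hx, hy⟩)
  have c3 : (x = 57 ∧ y = 56 ∧ z = 51 ∧ w = 48 ∨ x = 57 ∧ y = 56 ∧ z = 51 ∧ w = 49 ∨ x = 57 ∧ y = 56 ∧ z = 51 ∧ w = 50 ∨ x = 57 ∧ y = 56 ∧ z = 51 ∧ w = 51 ∨ x = 57 ∧ y = 56 ∧ z = 51 ∧ w = 52 ∨ x = 57 ∧ y = 56 ∧ z = 51 ∧ w = 53 ∨ x = 55 ∧ y = 48 ∧ z = 51 ∧ w = 49 ∨ x = 55 ∧ y = 48 ∧ z = 51 ∧ w = 50) ↔ False :=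
    iff_false_intro (by rintro (⟨hx, hy, -⟩|⟨hx, hy, -⟩|⟨hx, hy, -⟩|⟨hx, hy, -⟩|⟨hx, hy, -⟩|⟨hx, hy, -⟩|⟨hx, hy, -⟩|⟨hx, hy, -⟩) <;>
      first | exact h9 ⟨hx, hy⟩ | exact h7 ⟨hx, hy⟩)
  have c4 : (x = 57 ∧ y = 56 ∧ z = 52 ∧ w = 48 ∨ x = 57 ∧ y = 56 ∧ z = 52 ∧ w = 49 ∨ x = 57 ∧ y = 56 ∧ z = 52 ∧ w = 50 ∨ x = 57 ∧ y = 56 ∧ z = 52 ∧ w = 51 ∨ x = 57 ∧ y = 56 ∧ z = 52 ∧ w = 52 ∨ x = 57 ∧ y = 56 ∧ z = 52 ∧ w = 53 ∨ x = 55 ∧ y = 48 ∧ z = 52 ∧ w = 49 ∨ x = 55 ∧ y = 48 ∧ z = 52 ∧ w = 50) ↔ False :=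
    iff_false_intro (by rintro (⟨hx, hy, -⟩|⟨hx, hy, -⟩|⟨hx, hy, -⟩|⟨hx, hy, -⟩|⟨hx, hy, -⟩|⟨hx, hy, -⟩|⟨hx, hy, -⟩|⟨hx, hy, -⟩) <;>
      first | exact h9 ⟨hx, hy⟩ | exact h7 ⟨hx, hy⟩)
  have c5 : (x = 57 ∧ y = 56 ∧ z = 56 ∧ w = 48 ∨ x = 57 ∧ y = 56 ∧ z = 56 ∧ w = 49 ∨ x = 57 ∧ y = 56 ∧ z = 56 ∧ w = 50 ∨ x = 57 ∧ y = 56 ∧ z = 56 ∧ w = 51 ∨ x = 57 ∧ y = 56 ∧ z = 56 ∧ w = 52 ∨ x = 57 ∧ y = 56 ∧ z = 56 ∧ w = 53 ∨ x = 56 ∧ y = 48 ∧ z = 56 ∧ w = 48 ∨ x = 56 ∧ y = 48 ∧ z = 56 ∧ w = 49) ↔ False :=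
    iff_false_intro (by rintro (⟨hx, hy, -⟩|⟨hx, hy, -⟩|⟨hx, hy, -⟩|⟨hx, hy, -⟩|⟨hx, hy, -⟩|⟨hx, hy, -⟩|⟨hx, hy, -⟩|⟨hx, hy, -⟩) <;>
      first | exact h9 ⟨hx, hy⟩ | exact h8 ⟨hx, hy⟩)
  have c6 : (x = 57 ∧ y = 56 ∧ z = 52 ∧ w = 56 ∨ x = 57 ∧ y = 56 ∧ z = 52 ∧ w = 57 ∨ x = 57 ∧ y = 56 ∧ z = 53 ∧ w = 48 ∨ x = 57 ∧ y = 56 ∧ z = 53 ∧ w = 49 ∨ x = 57 ∧ y = 56 ∧ z = 53 ∧ w = 50 ∨ x = 57 ∧ y = 56 ∧ z = 53 ∧ w = 51 ∨ x = 55 ∧ y = 48 ∧ z = 52 ∧ w = 56 ∨ x = 55 ∧ y = 48 ∧ z = 52 ∧ w = 57) ↔ False :=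
    iff_false_intro (by rintro (⟨hx, hy, -⟩|⟨hx, hy, -⟩|⟨hx, hy, -⟩|⟨hx, hy, -⟩|⟨hx, hy, -⟩|⟨hx, hy, -⟩|⟨hx, hy, -⟩|⟨hx, hy, -⟩) <;>
      first | exact h9 ⟨hx, hy⟩ | exact h7 ⟨hx, hy⟩)
  have t1 : (x = 57 ∧ y = 56) ↔ False := iff_false_intro h9
  have t2 : (x = 55 ∧ y = 48) ↔ False := iff_false_intro h7
  have t3 : (x = 56 ∧ y = 48 ∧ z = 56 ∧ (48 ≤ w ∧ w ≤ 49)) ↔ False :=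
    iff_false_intro (fun h => h8 ⟨h.1, h.2.1⟩)
  simp only [c1, c2, c3, c4, c5, c6, t1, t2, t3, if_false]

-- A's table scan computes B's decision tree on every 4-character prefix
theorem pvCase4 (p : String) (a b c d : Char) (hp : p.toList = [a, b, c, d]) :
    pvScanA pvMetroCircles p = pvTree a b c d := by
  have hc : pvCodes p = [a.toNat, b.toNat, c.toNat, d.toNat] := by
    simp [pvCodes, hp]
  rw [pvScan_to_num, pvTableN_eq, hc, pvTree_num]
  exact pvNum a.toNat b.toNat c.toNat d.toNat

-- …and the scan returns None when the prefix does not have exactly 4 characters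
theorem pvScan_none (gs : List (String × List String)) (p : String)
    (hlen : ∀ g ∈ gs, ∀ t ∈ g.2, t.toList.length = 4) (hp : p.toList.length ≠ 4) :
    pvScanA gs p = none := by
  induction gs with
  | nil => rfl
  | cons g rest ih =>
    obtain ⟨c, ps⟩ := g
    have hnm : p ∉ ps := fun hm => hp (hlen (c, ps) (List.mem_cons_self ..) p hm)
    rw [pvScanA, if_neg hnm]
    exact ih fun g hg => hlen g (List.mem_cons_of_mem _ hg)

theorem pvScan_eq_tree (p : String) :
    pvScanA pvMetroCircles p
      = (match p.toList with | [a, b, c, d] => pvTree a b c d | _ => none) := by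
  rcases hp : p.toList with _ | ⟨a, _ | ⟨b, _ | ⟨c, _ | ⟨d, _ | ⟨e, rest⟩⟩⟩⟩⟩
  case cons.cons.cons.cons.nil =>
    exact pvCase4 p a b c d hp
  all_goals
    have hl : p.toList.length ≠ 4 := by rw [hp]; simp
    exact pvScan_none pvMetroCircles p (by decide) hl

-- ===== VERDICT (by name: the statement is the Claim_ definition above) =====
theorem get_indian_circle_info_py_spec : Claim_equal_get_indian_circle_info_py := by
  intro n _
  unfold Spec_get_indian_circle_info_py
  simp only [get_indian_circle_info_py, get_indian_circle_info_py_alt]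
  rw [pvScan_eq_tree]
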